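-- pv_equiv track=rewrite | github.com/Logenleedev/--Data-Structure-and-Algorithm | Extra/Company_OA/PIMCO/max_profit.py | contprofit
-- ===== SOURCE A (Python) =====
-- def contprofit(arr, k):
--     profits = 0
--     for i in range(len(arr) - k):
--         window = sum(arr[i : i + k])
--
--
--         for j in range(i + k, len(arr)):
--             nextwindow = sum(arr[j : j + k])
--
--
--             if j + k > len(arr) - 1:
--                 diff = (j + k) - len(arr)
--                 nextwindow += sum(arr[0:diff])
--             profits = max(profits, window + nextwindow)
--     return profits
-- ===== SOURCE B (Python) =====
-- def contprofit(arr, k):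
--     n = len(arr)
--     prefix = [0]
--     for x in arr:
--         prefix.append(prefix[-1] + x)
--     best = 0
--     suf = None
--     # walk j downward; suf is the running max of circular k-window sums starting in [j, n)
--     for u in range(n - k):
--         j = n - 1 - u
--         if j + k <= n:
--             circ = prefix[j + k] - prefix[j]
--         else:
--             circ = prefix[n] - prefix[j] + prefix[j + k - n]
--         suf = circ if suf is None else max(suf, circ)
--         i = j - k
--         if 0 <= i:
--             best = max(best, prefix[i + k] - prefix[i] + suf)
--     return best
-- ===== Notes on version B (the rewrite author's own statement) =====
-- stated objective: faster
-- what changed: Replaces the nested loops that re-sum every window slice with a prefix-sum array for O(1) window sums and a single backward pass maintaining the running maximum of circular second-window sums, so the answer is one O(n) scan instead of O(n^2) window re-summations.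
-- outside the precondition, e.g. on contprofit([1, 2, 3], -1): A returns 6, B returns 12
import Mathlib
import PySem

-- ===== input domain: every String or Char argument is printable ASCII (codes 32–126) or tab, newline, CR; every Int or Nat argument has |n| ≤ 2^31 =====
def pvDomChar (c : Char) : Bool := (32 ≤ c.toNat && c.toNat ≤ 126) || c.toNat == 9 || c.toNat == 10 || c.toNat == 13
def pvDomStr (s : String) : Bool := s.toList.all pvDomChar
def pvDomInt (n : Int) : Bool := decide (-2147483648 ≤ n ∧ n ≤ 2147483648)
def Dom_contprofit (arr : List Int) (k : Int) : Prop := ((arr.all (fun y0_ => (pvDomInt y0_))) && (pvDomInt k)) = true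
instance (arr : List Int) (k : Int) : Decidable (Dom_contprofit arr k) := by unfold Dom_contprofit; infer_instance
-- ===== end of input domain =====

-- B replaces A's nested re-summed window slices by prefix sums and one backward
-- suffix-max pass (objective: faster, measured asymptotically).

-- ===== PORT A =====
def contprofit (arr : List Int) (k : Int) : Int :=
  (PySem.List.pyRange 0 ((arr.length : Int) - k) 1).foldl (fun profits i =>
    let window := (PySem.List.slice arr (some i) (some (i + k))).sum
    (PySem.List.pyRange (i + k) (arr.length : Int) 1).foldl (fun profits j =>
      let nextwindow := (PySem.List.slice arr (some j) (some (j + k))).sum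
      let nextwindow :=
        if j + k > (arr.length : Int) - 1 then
          let diff := (j + k) - (arr.length : Int)
          nextwindow + (PySem.List.slice arr (some 0) (some diff)).sum
        else nextwindow
      max profits (window + nextwindow)) profits) 0

-- ===== PORT B =====
def contprofit_alt (arr : List Int) (k : Int) : Int :=
  let n : Int := (arr.length : Int)
  let pfx := arr.foldl (fun acc x => acc ++ [PySem.List.pyGetD acc (-1) 0 + x]) [(0 : Int)]
  ((PySem.List.pyRange (n - 1) (k - 1) (-1)).foldl (fun st j =>
      let circ :=
        if j + k ≤ n then
          PySem.List.pyGetD pfx (j + k) 0 - PySem.List.pyGetD pfx j 0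
        else
          PySem.List.pyGetD pfx n 0 - PySem.List.pyGetD pfx j 0
            + PySem.List.pyGetD pfx (j + k - n) 0
      let suf := match st.2 with
        | none => circ
        | some s => max s circ
      let i := j - k
      let best :=
        if 0 ≤ i then
          max st.1 (PySem.List.pyGetD pfx (i + k) 0 - PySem.List.pyGetD pfx i 0 + suf)
        else st.1
      (best, some suf)) ((0 : Int), (none : Option Int))).1

-- ===== PRECONDITION & SPEC =====
-- Pre_ restricts to the natural domain of a window length: k ≥ 0. A also returns on
-- negative k, but that value comes from Python's negative-slice wraparound, outside
-- the task's natural domain, and B does not reproduce it.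
def Pre_contprofit (arr : List Int) (k : Int) : Prop := 0 ≤ k
instance (arr : List Int) (k : Int) : Decidable (Pre_contprofit arr k) := by unfold Pre_contprofit; infer_instance
def pvWitness_contprofit : List Int × Int := ([1, 2, 3, 4], 2)

def Spec_contprofit (arr : List Int) (k : Int) (out : Int) : Prop := out = contprofit_alt arr k
instance (arr : List Int) (k : Int) (out : Int) : Decidable (Spec_contprofit arr k out) := by unfold Spec_contprofit; infer_instance

-- ===== CLAIM (what is proved, stated in full; the proofs are below) =====
def Claim_equal_contprofit : Prop := ∀ (arr : List Int) (k : Int), Dom_contprofit arr k → Pre_contprofit arr k → Spec_contprofit arr k (contprofit arr k)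

-- ===== LEMMAS AND PROOFS =====

def circS (arr : List Int) (K j : Nat) : Int :=
  ((arr.drop j).take K).sum + (arr.take (j + K - arr.length)).sum

def linS (arr : List Int) (K i : Nat) : Int := ((arr.drop i).take K).sum

def sufS (arr : List Int) (K m : Nat) : Int :=
  (List.range (arr.length - m)).foldl (fun a u => max a (circS arr K (m + u))) (circS arr K m)

def commonS (arr : List Int) (K : Nat) : Int :=
  (List.range (arr.length - K)).foldl (fun p t => max p (linS arr K t + sufS arr K (t + K))) 0

-- pull a max out of a running-max fold
theorem pvMaxPull (g : Nat → Int) : ∀ (l : List Nat) (a b : Int),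
    l.foldl (fun p x => max p (g x)) (max a b) = max a (l.foldl (fun p x => max p (g x)) b) := by
  intro l
  induction l with
  | nil => intro a b; rfl
  | cons x t ih =>
      intro a b
      simp only [List.foldl_cons, max_assoc]
      exact ih a (max b (g x))

-- collapse 'max p (w + c u)' over a nonempty range
theorem pvInnerCollapse (c : Nat → Int) (w : Int) : ∀ (m : Nat), 1 ≤ m → ∀ (p : Int),
    (List.range m).foldl (fun p u => max p (w + c u)) p
      = max p (w + (List.range m).foldl (fun a u => max a (c u)) (c 0)) := by
  intro m
  induction m with
  | zero => intro h; omega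
  | succ m ih =>
      intro _ p
      rcases Nat.eq_zero_or_pos m with hm | hm
      · subst hm; simp
      · rw [List.range_succ, List.foldl_append, List.foldl_append, ih hm]
        simp only [List.foldl_cons, List.foldl_nil]
        generalize (List.range m).foldl (fun a u => max a (c u)) (c 0) = F
        omega

-- reversal of a running-max fold over a range
theorem pvMaxRev (G : Nat → Int) (m : Nat) :
    (List.range m).foldl (fun p u => max p (G (m - 1 - u))) 0
      = (List.range m).foldl (fun p t => max p (G t)) 0 := by
  induction m with
  | zero => rfl
  | succ m ih =>
      conv_rhs => rw [List.range_succ]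
      conv_lhs => rw [List.range_succ_eq_map]
      simp only [List.foldl_cons, List.foldl_map, List.foldl_append, List.foldl_nil]
      have h1 : ∀ u : Nat, m + 1 - 1 - (u + 1) = m - 1 - u := by intro u; omega
      have h2 : m + 1 - 1 - 0 = m := by omega
      simp only [h1, h2]
      rw [show (max 0 (G m)) = max (G m) 0 by omega, pvMaxPull, ih]
      omega

def pvStep : List Int → Int → List Int := fun acc x => acc ++ [PySem.List.pyGetD acc (-1) 0 + x]

theorem pvPrefixAux : ∀ (l base : List Int) (s : Int), base.getLast? = some s →
    l.foldl pvStep base = base ++ (List.range l.length).map (fun t => s + (l.take (t + 1)).sum) := by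
  intro l
  induction l with
  | nil => intro base s _; simp
  | cons x xs ih =>
      intro base s hs
      have hne : base ≠ [] := by intro h; subst h; simp at hs
      have hstep : pvStep base x = base ++ [s + x] := by
        unfold pvStep
        rw [PySem.List.pyGetD_neg_one base 0 hne]
        have : base.getLast hne = s := by
          have := List.getLast?_eq_some_getLast hne
          rw [hs] at this; exact (Option.some_inj.mp this).symm
        rw [this]
      rw [List.foldl_cons, hstep, ih (base ++ [s + x]) (s + x) (by simp)]
      rw [List.length_cons, List.range_succ_eq_map]
      simp [List.map_map, Function.comp, add_assoc]

theorem pvPrefixEq (arr : List Int) :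
    arr.foldl pvStep [0] = (List.range (arr.length + 1)).map (fun t => (arr.take t).sum) := by
  rw [pvPrefixAux arr [0] 0 (by simp), List.range_succ_eq_map]
  simp [List.map_map, Function.comp]

theorem pvPrefixGetD (arr : List Int) (t : Nat) (h : t ≤ arr.length) :
    PySem.List.pyGetD (arr.foldl pvStep [0]) ((t : Nat) : Int) 0 = (arr.take t).sum := by
  rw [PySem.List.pyGetD_natCast, pvPrefixEq]
  have ht : t < arr.length + 1 := by omega
  simp [List.getD, ht]

theorem pvTakeSplit (arr : List Int) (a b : Nat) (hab : a ≤ b) :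
    (arr.take b).sum = (arr.take a).sum + ((arr.drop a).take (b - a)).sum := by
  rw [show b = a + (b - a) by omega, List.take_add, List.sum_append, Nat.add_sub_cancel_left]

theorem pvDropSum (arr : List Int) (j : Nat) :
    (arr.drop j).sum = arr.sum - (arr.take j).sum := by
  have h := List.take_append_drop j arr
  have : ((arr.take j) ++ (arr.drop j)).sum = arr.sum := by rw [h]
  rw [List.sum_append] at this
  omega

theorem pvMaxFoldInit (c : Nat → Int) (r : Nat) (hr : 1 ≤ r) (p : Int) :
    (List.range r).foldl (fun a u => max a (c u)) p
      = max p ((List.range r).foldl (fun a u => max a (c u)) (c 0)) := by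
  have h := pvInnerCollapse c 0 r hr p
  simpa using h

theorem pvSufLast (arr : List Int) (K : Nat) (h : 1 ≤ arr.length) :
    sufS arr K (arr.length - 1) = circS arr K (arr.length - 1) := by
  unfold sufS
  rw [show arr.length - (arr.length - 1) = 1 by omega]
  simp

theorem pvSufCons (arr : List Int) (K m : Nat) (h : m + 1 < arr.length) :
    sufS arr K m = max (sufS arr K (m + 1)) (circS arr K m) := by
  unfold sufS
  rw [show arr.length - m = (arr.length - m - 1) + 1 by omega, List.range_succ_eq_map]
  simp only [List.foldl_cons, List.foldl_map, Nat.add_zero, max_self]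
  have e1 : ∀ u : Nat, m + Nat.succ u = (m + 1) + u := by intro u; omega
  simp only [Nat.succ_eq_add_one] at *
  have e2 : arr.length - (m + 1) = arr.length - m - 1 := by omega
  rw [e2]
  have hr : 1 ≤ arr.length - m - 1 := by omega
  rw [pvMaxFoldInit (fun u => circS arr K (m + (u + 1))) _ hr (circS arr K m),
      pvMaxFoldInit (fun u => circS arr K ((m + 1) + u)) _ hr (circS arr K (m + 1))]
  have e3 : (fun (a : Int) (u : Nat) => max a (circS arr K (m + (u + 1))))
      = (fun (a : Int) (u : Nat) => max a (circS arr K ((m + 1) + u))) := by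
    funext a u; rw [show m + (u + 1) = (m + 1) + u by omega]
  rw [e3, show m + (0 + 1) = (m + 1) + 0 by omega]
  have hF := (PySem.List.le_foldl_max_int (List.range (arr.length - m - 1))
      (fun u => circS arr K ((m + 1) + u)) (circS arr K ((m + 1) + 0))).1
  generalize (List.range (arr.length - m - 1)).foldl
      (fun a u => max a (circS arr K ((m + 1) + u))) (circS arr K ((m + 1) + 0)) = F at hF ⊢
  omega

theorem pvA (arr : List Int) (K : Nat) : contprofit arr (K : Int) = commonS arr K := by
  unfold contprofit commonS
  by_cases hnK : arr.length ≤ K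
  · rw [PySem.List.pyRange_one_eq_nil (by push_cast; omega),
        show arr.length - K = 0 by omega]
    rfl
  · rw [not_le] at hnK
    rw [PySem.List.pyRange_one,
        show (((arr.length : Int) - (K : Int)) - 0).toNat = arr.length - K by omega,
        List.foldl_map]
    refine PySem.List.foldl_congr_mem _ _ _ _ ?_
    intro p t ht
    rw [List.mem_range] at ht
    simp only
    have hcast1 : (0 : Int) + (t : Int) = ((t : Nat) : Int) := by push_cast; ring
    rw [hcast1]
    have hcast2 : ((t : Nat) : Int) + (K : Int) = (((t + K : Nat)) : Int) := by push_cast; ring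
    rw [hcast2, PySem.List.slice_natCast, show t + K - t = K by omega]
    rw [PySem.List.pyRange_one,
        show ((arr.length : Int) - ((t + K : Nat) : Int)).toNat
          = arr.length - (t + K) from by omega,
        List.foldl_map]
    refine (PySem.List.foldl_congr_mem _ _
        (fun q (u : Nat) => max q (((arr.drop t).take K).sum + circS arr K (t + K + u))) p ?_).trans ?_
    · intro acc u hu
      rw [List.mem_range] at hu
      simp only
      have hc3 : ((t + K : Nat) : Int) + (u : Int) = ((t + K + u : Nat) : Int) := by push_cast; ring
      have hc4 : ((t + K + u : Nat) : Int) + (K : Int) = ((t + K + u + K : Nat) : Int) := by push_cast; ring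
      rw [hc3, hc4, PySem.List.slice_natCast, show t + K + u + K - (t + K + u) = K by omega]
      by_cases hcond : ((t + K + u + K : Nat) : Int) > (arr.length : Int) - 1
      · rw [if_pos hcond,
            show ((t + K + u + K : Nat) : Int) - (arr.length : Int)
              = ((t + K + u + K - arr.length : Nat) : Int) from by omega,
            PySem.List.slice_zero_start, PySem.List.slice_to_natCast]
        unfold circS
        rw [show (t + K + u) + K - arr.length = t + K + u + K - arr.length by omega]
      · rw [if_neg hcond]
        unfold circS
        rw [show (t + K + u) + K - arr.length = 0 by omega]
        simp
    · have hm : 1 ≤ arr.length - (t + K) := by omega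
      rw [pvInnerCollapse (fun u => circS arr K (t + K + u)) (((arr.drop t).take K).sum) _ hm p]
      unfold linS sufS
      rw [Nat.add_zero]

def pvNS (arr : List Int) (K : Nat) (so : Option Int) (u : Nat) : Int :=
  match so with
  | none => circS arr K (arr.length - 1 - u)
  | some s => max s (circS arr K (arr.length - 1 - u))

def pvClean (arr : List Int) (K : Nat) (x : Int × Option Int) (u : Nat) : Int × Option Int :=
  (max x.1 (linS arr K (arr.length - 1 - u - K) + pvNS arr K x.2 u), some (pvNS arr K x.2 u))

def pvG (arr : List Int) (K : Nat) (u : Nat) : Int :=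
  linS arr K (arr.length - 1 - u - K) + sufS arr K (arr.length - 1 - u)

theorem pvCircEasy (arr : List Int) (K j : Nat) (h : j + K ≤ arr.length) :
    circS arr K j = (arr.take (j + K)).sum - (arr.take j).sum := by
  unfold circS
  rw [show j + K - arr.length = 0 by omega,
      pvTakeSplit arr j (j + K) (by omega), show j + K - j = K by omega]
  simp

theorem pvCircWrap (arr : List Int) (K j : Nat) (h1 : arr.length ≤ j + K) (h2 : j ≤ arr.length) :
    circS arr K j = arr.sum - (arr.take j).sum + (arr.take (j + K - arr.length)).sum := by
  unfold circS
  rw [List.take_of_length_le (by simp; omega), pvDropSum]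

theorem pvLinPair (arr : List Int) (K j : Nat) (h : j ≤ arr.length) (hK : K ≤ j) :
    (arr.take j).sum - (arr.take (j - K)).sum = linS arr K (j - K) := by
  unfold linS
  rw [pvTakeSplit arr (j - K) j (by omega), show j - (j - K) = K by omega]
  ring

theorem pvB (arr : List Int) (K : Nat) : contprofit_alt arr (K : Int) = commonS arr K := by
  unfold contprofit_alt
  dsimp only
  by_cases hnK : arr.length ≤ K
  · rw [PySem.List.pyRange_neg_one_eq_nil (by push_cast; omega)]
    unfold commonS
    rw [show arr.length - K = 0 by omega]
    rfl
  · rw [not_le] at hnK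
    rw [PySem.List.pyRange_neg_one,
        show (((arr.length : Int) - 1) - ((K : Int) - 1)).toNat = arr.length - K by omega,
        List.foldl_map,
        show arr.foldl (fun acc x => acc ++ [PySem.List.pyGetD acc (-1) 0 + x]) [(0 : Int)]
          = arr.foldl pvStep [0] from rfl]
    refine (congrArg Prod.fst (PySem.List.foldl_congr_mem _ _ (pvClean arr K)
        ((0 : Int), (none : Option Int)) ?_)).trans ?_
    · -- one loop step equals the clean step
      intro x u hu
      rw [List.mem_range] at hu
      obtain ⟨b, so⟩ := x
      have hu1 : u + 1 ≤ arr.length - K := by omega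
      have e1 : (arr.length : Int) - 1 - (u : Int) - (K : Int) = ((arr.length - 1 - u - K : Nat) : Int) := by
        push_cast; omega
      have e2 : (arr.length : Int) - 1 - (u : Int) - (K : Int) + (K : Int)
          = ((arr.length - 1 - u : Nat) : Int) := by push_cast; omega
      have e3 : (arr.length : Int) - 1 - (u : Int) = ((arr.length - 1 - u : Nat) : Int) := by
        push_cast; omega
      have e4 : (arr.length : Int) - 1 - (u : Int) + (K : Int)
          = ((arr.length - 1 - u + K : Nat) : Int) := by push_cast; omega
      have hpos : (0 : Int) ≤ (arr.length : Int) - 1 - (u : Int) - (K : Int) := by push_cast; omega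
      have hcirc :
          (if (arr.length : Int) - 1 - (u : Int) + (K : Int) ≤ (arr.length : Int) then
            PySem.List.pyGetD (arr.foldl pvStep [0]) ((arr.length : Int) - 1 - (u : Int) + (K : Int)) 0 -
              PySem.List.pyGetD (arr.foldl pvStep [0]) ((arr.length : Int) - 1 - (u : Int)) 0
          else
            PySem.List.pyGetD (arr.foldl pvStep [0]) ((arr.length : Int)) 0 -
                PySem.List.pyGetD (arr.foldl pvStep [0]) ((arr.length : Int) - 1 - (u : Int)) 0 +
              PySem.List.pyGetD (arr.foldl pvStep [0])
                ((arr.length : Int) - 1 - (u : Int) + (K : Int) - (arr.length : Int)) 0)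
          = circS arr K (arr.length - 1 - u) := by
        by_cases hc : (arr.length : Int) - 1 - (u : Int) + (K : Int) ≤ (arr.length : Int)
        · rw [if_pos hc, e4, e3, pvPrefixGetD arr _ (by omega), pvPrefixGetD arr _ (by omega),
              pvCircEasy arr K _ (by omega), show arr.length - 1 - u + K = (arr.length - 1 - u) + K from rfl]
        · rw [if_neg hc,
              show (arr.length : Int) - 1 - (u : Int) + (K : Int) - (arr.length : Int)
                = ((arr.length - 1 - u + K - arr.length : Nat) : Int) from by push_cast; omega,
              e3,
              show ((arr.length : Int)) = ((arr.length : Nat) : Int) from rfl,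
              pvPrefixGetD arr _ (by omega), pvPrefixGetD arr _ (by omega),
              pvPrefixGetD arr _ (by omega),
              List.take_length,
              pvCircWrap arr K _ (by omega) (by omega)]
      rcases so with _ | s
      · simp only [pvClean, pvNS]
        rw [if_pos hpos, hcirc, e2, e1, pvPrefixGetD arr _ (by omega), pvPrefixGetD arr _ (by omega),
            pvLinPair arr K (arr.length - 1 - u) (by omega) (by omega)]
      · simp only [pvClean, pvNS]
        rw [if_pos hpos, hcirc, e2, e1, pvPrefixGetD arr _ (by omega), pvPrefixGetD arr _ (by omega),
            pvLinPair arr K (arr.length - 1 - u) (by omega) (by omega)]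
    · -- the clean fold computes commonS
      have inv : ∀ c, c ≤ arr.length - K →
          (List.range c).foldl (pvClean arr K) ((0 : Int), (none : Option Int))
            = ((List.range c).foldl (fun p u => max p (pvG arr K u)) 0,
               if c = 0 then (none : Option Int) else some (sufS arr K (arr.length - c))) := by
        intro c
        induction c with
        | zero => intro _; rfl
        | succ c ih =>
            intro hc
            rw [List.range_succ, List.foldl_append, List.foldl_append, ih (by omega)]
            simp only [List.foldl_cons, List.foldl_nil]
            rcases Nat.eq_zero_or_pos c with hc0 | hc0
            · subst hc0
              unfold pvG
              simp only [pvClean, pvNS, List.range_zero, List.foldl_nil, Nat.sub_zero, reduceIte]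
              rw [pvSufLast arr K (by omega), show arr.length - 1 = arr.length - (0 + 1) by omega]
              norm_num
            · rw [if_neg (by omega)]
              simp only [pvClean, pvNS]
              have hsuf : max (sufS arr K (arr.length - c)) (circS arr K (arr.length - 1 - c))
                  = sufS arr K (arr.length - (c + 1)) := by
                rw [show arr.length - (c + 1) = arr.length - 1 - c by omega]
                rw [pvSufCons arr K (arr.length - 1 - c) (by omega),
                    show arr.length - 1 - c + 1 = arr.length - c by omega]
              rw [if_neg (by omega), hsuf]
              unfold pvG
              rw [show arr.length - (c + 1) = arr.length - 1 - c by omega]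
      rw [inv (arr.length - K) le_rfl]
      simp only
      rw [PySem.List.foldl_congr_mem _ _
            (fun (p : Int) (u : Nat) =>
              max p (linS arr K (arr.length - K - 1 - u)
                + sufS arr K ((arr.length - K - 1 - u) + K))) 0
            (by
              intro p u hu
              rw [List.mem_range] at hu
              unfold pvG
              rw [show arr.length - 1 - u - K = arr.length - K - 1 - u by omega,
                  show arr.length - 1 - u = (arr.length - K - 1 - u) + K by omega]),
          pvMaxRev (fun t => linS arr K t + sufS arr K (t + K)) (arr.length - K)]
      rfl

-- ===== VERDICT (by name: the statement is the Claim_ definition above) =====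
theorem contprofit_spec : Claim_equal_contprofit := by
  intro arr k _ hk
  unfold Spec_contprofit
  obtain ⟨K, rfl⟩ := Int.eq_ofNat_of_zero_le hk
  rw [pvA, pvB]
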